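-- pv_equiv track=rewrite | github.com/Aakanshakowerjani/Competitive-Programming | 123triangle.py | func
-- ===== SOURCE A (Python) =====
-- def func(l):
--     if len(l)==1:
--         return l[0]
--     else:
--         l1=[]
--         for i in range(len(l)-1):
--             l1.append(abs(l[i]-l[i+1]))
--         return func(l1)
-- ===== SOURCE B (Python) =====
-- def func(l):
--     while len(l) > 1:
--         l = [abs(a - b) for a, b in zip(l, l[1:])]
--     return l[0]
-- ===== Notes on version B (the rewrite author's own statement) =====
-- stated objective: simpler
-- what changed: Replaces the recursive self-call and index-based rebuild with an iterative while-loop that rebuilds the list by zipping it with its own tail; same shrinking-list reduction, no recursion and no per-element indexing.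
import Mathlib
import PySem

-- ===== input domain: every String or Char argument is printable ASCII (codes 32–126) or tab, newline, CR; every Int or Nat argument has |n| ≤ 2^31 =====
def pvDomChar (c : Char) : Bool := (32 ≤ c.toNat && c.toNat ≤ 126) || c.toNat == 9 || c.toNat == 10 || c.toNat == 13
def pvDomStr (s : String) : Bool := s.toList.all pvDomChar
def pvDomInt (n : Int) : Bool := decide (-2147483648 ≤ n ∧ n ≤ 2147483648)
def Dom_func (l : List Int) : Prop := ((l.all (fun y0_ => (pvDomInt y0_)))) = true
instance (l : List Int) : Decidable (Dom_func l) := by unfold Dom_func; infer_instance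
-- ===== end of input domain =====

-- B replaces A's recursion and index-based rebuild with an iterative while-loop over zip(l, l[1:]): simpler, same reduction.

-- ===== PORT A =====
-- A's loop body: l1 = []; for i in range(len(l)-1): l1.append(abs(l[i]-l[i+1])).
-- Indices i, i+1 are always in range here, so pyGetD with default 0 is exactly Python's l[i].
def funcStepA (l : List Int) : List Int :=
  (PySem.List.pyRange 0 ((l.length : Int) - 1) 1).foldl
    (fun l1 i => l1 ++ [|PySem.List.pyGetD l i 0 - PySem.List.pyGetD l (i + 1) 0|]) []

-- A recurses on a list one shorter each call; fuel = initial length bounds the recursion depth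
-- (on the empty list Python A never terminates; Pre_func excludes it, the port returns 0 there).
def funcGo : Nat → List Int → Int
  | 0, l => PySem.List.pyGetD l 0 0
  | fuel + 1, l => if l.length = 1 then PySem.List.pyGetD l 0 0 else funcGo fuel (funcStepA l)

def func (l : List Int) : Int := funcGo l.length l

-- ===== PORT B =====
-- B's loop body: [abs(a - b) for a, b in zip(l, l[1:])];  l[1:] is PySem slice from 1.
def funcStepB (l : List Int) : List Int :=
  (l.zip (PySem.List.slice l (some 1) none)).map (fun p => |p.1 - p.2|)

-- while len(l) > 1: each pass shortens l by one, so length steps suffice as fuel.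
def funcAltGo : Nat → List Int → List Int
  | 0, l => l
  | fuel + 1, l => if 1 < l.length then funcAltGo fuel (funcStepB l) else l

def func_alt (l : List Int) : Int :=
  PySem.List.pyGetD (funcAltGo l.length l) 0 0

-- ===== PRECONDITION & SPEC =====
-- Pre_ excludes only the empty list, on which Python A recurses forever (RecursionError).
def Pre_func (l : List Int) : Prop := l ≠ []
instance (l : List Int) : Decidable (Pre_func l) := by unfold Pre_func; infer_instance
def pvWitness_func : List Int := [3, 1, 4]

def Spec_func (l : List Int) (out : Int) : Prop := out = func_alt l
instance (l : List Int) (out : Int) : Decidable (Spec_func l out) := by unfold Spec_func; infer_instance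

-- ===== CLAIM (what is proved, stated in full; the proofs are below) =====
def Claim_equal_func : Prop := ∀ (l : List Int), Dom_func l → Pre_func l → Spec_func l (func l)

-- ===== LEMMAS AND PROOFS =====

theorem funcAltGo_nil (n : Nat) : funcAltGo n [] = [] := by
  induction n with
  | zero => rfl
  | succ k ih => simp [funcAltGo]

-- Both step functions compute the list of absolute adjacent differences.
theorem funcStepA_eq_funcStepB (l : List Int) : funcStepA l = funcStepB l := by
  unfold funcStepA funcStepB
  rw [PySem.List.foldl_append_singleton_eq_map, PySem.List.slice_from_one]
  apply List.ext_getElem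
  · simp [PySem.List.length_pyRange_one, List.length_zip, List.length_tail]
  · intro k h1 h2
    have hk : k < l.length - 1 := by
      simpa [List.length_zip, List.length_tail] using h2
    have hk' : (k : Int) < (l.length : Int) - 1 := by omega
    simp [PySem.List.getElem_pyRange_one, List.getElem_zip, List.getElem_tail,
      PySem.List.pyGetD_natCast]
    rw [show ((k : Int) + 1) = ((k + 1 : Nat) : Int) by push_cast; ring,
      PySem.List.pyGetD_natCast]
    simp [List.getElem?_eq_getElem (show k < l.length by omega),
      List.getElem?_eq_getElem (show k + 1 < l.length by omega)]

theorem funcGo_eq (fuel : Nat) (l : List Int) :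
    funcGo fuel l = PySem.List.pyGetD (funcAltGo fuel l) 0 0 := by
  induction fuel generalizing l with
  | zero => rfl
  | succ n ih =>
    by_cases h : l.length = 1
    · simp [funcGo, funcAltGo, h]
    · simp only [funcGo, funcAltGo, h, if_false]
      by_cases h2 : 1 < l.length
      · rw [if_pos h2, funcStepA_eq_funcStepB, ih]
      · -- l = []: A's step on [] is [] again, B's loop stops; both index the empty list.
        have hl : l = [] := List.eq_nil_of_length_eq_zero (by omega)
        subst hl
        rw [if_neg h2, funcStepA_eq_funcStepB]
        show funcGo n [] = _
        rw [ih, funcAltGo_nil]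

-- ===== VERDICT (by name: the statement is the Claim_ definition above) =====
theorem func_spec : Claim_equal_func := by
  intro l _ _
  unfold Spec_func func func_alt
  exact funcGo_eq l.length l
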